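-- pv_equiv track=rewrite | github.com/satyaprakashmohanty13/Sudoku-Solver-ocr | Solve_Sudoku.py | notInRow
-- ===== SOURCE A (Python) =====
-- def notInRow(arr, row):
--     st = set()
--     for i in range(0, 9):
--         if arr[row][i] in st:
--             return False
--         if arr[row][i] != 0:
--             st.add(arr[row][i])
--     return True
-- ===== SOURCE B (Python) =====
-- def notInRow(arr, row):
--     vals = sorted(v for v in arr[row][:9] if v != 0)
--     return all(x != y for x, y in zip(vals, vals[1:]))
-- ===== Notes on version B (the rewrite author's own statement) =====
-- stated objective: alternative
-- what changed: Replaces A's incremental hash-set membership loop with early return by a sort-based check: sort the nonzero entries of the row and verify that no two adjacent sorted values are equal.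
import Mathlib
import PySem

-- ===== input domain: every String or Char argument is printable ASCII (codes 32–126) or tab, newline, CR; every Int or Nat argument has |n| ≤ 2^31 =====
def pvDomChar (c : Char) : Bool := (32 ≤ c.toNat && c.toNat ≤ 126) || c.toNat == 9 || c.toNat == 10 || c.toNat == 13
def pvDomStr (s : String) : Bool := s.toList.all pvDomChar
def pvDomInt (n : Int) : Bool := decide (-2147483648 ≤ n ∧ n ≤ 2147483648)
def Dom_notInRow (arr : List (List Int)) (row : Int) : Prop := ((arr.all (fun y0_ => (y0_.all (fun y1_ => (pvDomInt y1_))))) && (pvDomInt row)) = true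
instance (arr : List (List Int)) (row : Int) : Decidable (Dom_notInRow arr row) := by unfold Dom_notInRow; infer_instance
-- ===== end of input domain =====

-- B replaces A's incremental hash-set membership loop (early return) by a
-- sort-then-adjacent-scan duplicate check; objective: alternative.


-- ===== PORT A =====
-- the `for i in range(0, 9)` loop with its two branches; arr[row][i] is read via
-- pyGetD (exact under Pre_, where every index A reads is in range)
def notInRowLoop (arr : List (List Int)) (row : Int) (st : PySem.Set Int) : List Int → Bool
  | [] => true
  | i :: rest =>
    if PySem.Set.contains st (PySem.List.pyGetD (PySem.List.pyGetD arr row []) i 0) then false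
    else if PySem.List.pyGetD (PySem.List.pyGetD arr row []) i 0 ≠ 0 then
      notInRowLoop arr row (PySem.Set.add st (PySem.List.pyGetD (PySem.List.pyGetD arr row []) i 0)) rest
    else notInRowLoop arr row st rest

def notInRow (arr : List (List Int)) (row : Int) : Bool :=
  notInRowLoop arr row PySem.Set.empty (PySem.List.pyRange 0 9 1)

-- ===== PORT B =====
-- all(x != y for x, y in zip(vals, vals[1:])): the adjacent-pair scan
def adjAllNe : List Int → Bool
  | a :: b :: rest => (a != b) && adjAllNe (b :: rest)
  | _ => true

def notInRow_alt (arr : List (List Int)) (row : Int) : Bool :=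
  let vals := PySem.List.sorted
    ((PySem.List.slice (PySem.List.pyGetD arr row []) none (some 9)).filter (fun v => decide (v ≠ 0)))
    (fun x => x) false
  adjAllNe vals

-- ===== PRECONDITION & SPEC =====
-- Pre_ excludes exactly the inputs where Python A raises IndexError: an invalid row
-- index, or a valid row with fewer than 9 entries on which the loop runs off the end
-- (i.e. its nonzero entries are all distinct, so no early `return False` fires).
def Pre_notInRow (arr : List (List Int)) (row : Int) : Prop :=
  PySem.Raise.InRange arr.length row ∧
    (9 ≤ (PySem.List.pyGetD arr row []).length ∨
      ¬ ((PySem.List.pyGetD arr row []).filter (fun x => decide (x ≠ 0))).Nodup)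
instance (arr : List (List Int)) (row : Int) : Decidable (Pre_notInRow arr row) := by unfold Pre_notInRow; infer_instance

def pvWitness_notInRow : List (List Int) × Int := ([[5, 3, 0, 0, 7, 0, 0, 0, 0]], 0)

def Spec_notInRow (arr : List (List Int)) (row : Int) (out : Bool) : Prop := out = notInRow_alt arr row
instance (arr : List (List Int)) (row : Int) (out : Bool) : Decidable (Spec_notInRow arr row out) := by unfold Spec_notInRow; infer_instance

-- ===== CLAIM (what is proved, stated in full; the proofs are below) =====
def Claim_equal_notInRow : Prop := ∀ (arr : List (List Int)) (row : Int), Dom_notInRow arr row → Pre_notInRow arr row → Spec_notInRow arr row (notInRow arr row)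

-- ===== LEMMAS AND PROOFS =====

-- A's loop with the index dereferencing abstracted away: the same loop over the values
def loopV (st : PySem.Set Int) : List Int → Bool
  | [] => true
  | v :: rest =>
    if PySem.Set.contains st v then false
    else if v ≠ 0 then loopV (PySem.Set.add st v) rest
    else loopV st rest

theorem notInRowLoop_eq_loopV (arr : List (List Int)) (row : Int) (is : List Int)
    (st : PySem.Set Int) :
    notInRowLoop arr row st is
      = loopV st (is.map (fun i => PySem.List.pyGetD (PySem.List.pyGetD arr row []) i 0)) := by
  induction is generalizing st with
  | nil => rfl
  | cons i rest ih => simp only [notInRowLoop, loopV, List.map_cons]; split_ifs <;> simp [ih]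

theorem loopV_eq_true_iff (vs : List Int) (st : PySem.Set Int) (h0 : (0 : Int) ∉ st) :
    (loopV st vs = true
      ↔ (vs.filter (fun x => decide (x ≠ 0))).Nodup
        ∧ ∀ v ∈ vs.filter (fun x => decide (x ≠ 0)), v ∉ st) := by
  induction vs generalizing st with
  | nil => simp [loopV]
  | cons v rest ih =>
    by_cases hv : v = 0
    · subst hv
      have hstep : loopV st ((0 : Int) :: rest) = loopV st rest := by
        simp [loopV, h0]
      have hf : List.filter (fun x => decide (x ≠ 0)) ((0 : Int) :: rest)
          = List.filter (fun x => decide (x ≠ 0)) rest := by simp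
      rw [hstep, hf, ih st h0]
    · have hfc : List.filter (fun x => decide (x ≠ 0)) (v :: rest)
          = v :: List.filter (fun x => decide (x ≠ 0)) rest := by
        simp [hv]
      by_cases hmem : v ∈ st
      · have hstep : loopV st (v :: rest) = false := by simp [loopV, hmem]
        rw [hstep, hfc]
        simp only [Bool.false_eq_true, false_iff, not_and]
        intro _ hdis
        exact absurd hmem (hdis v (List.mem_cons_self))
      · have hstep : loopV st (v :: rest) = loopV (PySem.Set.add st v) rest := by
          simp [loopV, hmem, hv]
        have h0' : (0 : Int) ∉ PySem.Set.add st v := by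
          intro h
          rcases (PySem.Set.mem_add st v 0).mp h with h | h
          · exact h0 h
          · exact hv h.symm
        have key : ∀ w : Int, w ∉ PySem.Set.add st v ↔ (w ∉ st ∧ w ≠ v) := by
          intro w
          constructor
          · intro h
            exact ⟨fun hw => h ((PySem.Set.mem_add st v w).mpr (Or.inl hw)),
                   fun hw => h ((PySem.Set.mem_add st v w).mpr (Or.inr hw))⟩
          · rintro ⟨h1, h2⟩ h
            rcases (PySem.Set.mem_add st v w).mp h with h | h
            · exact h1 h
            · exact h2 h
        rw [hstep, ih _ h0', hfc, List.nodup_cons, List.forall_mem_cons]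
        constructor
        · rintro ⟨hnd, hdis⟩
          exact ⟨⟨fun hvf => ((key v).mp (hdis v hvf)).2 rfl, hnd⟩, hmem,
                 fun w hw => ((key w).mp (hdis w hw)).1⟩
        · rintro ⟨⟨hvf, hnd⟩, -, hdis⟩
          exact ⟨hnd, fun w hw => (key w).mpr ⟨hdis w hw, fun h => hvf (h ▸ hw)⟩⟩

theorem filter_map_range_getD (n : Nat) (r : List Int) :
    ((List.range n).map (fun k => r.getD k 0)).filter (fun x => decide (x ≠ 0))
      = (r.take n).filter (fun x => decide (x ≠ 0)) := by
  induction n with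
  | zero => simp
  | succ m ih =>
    rw [List.range_succ, List.map_append, List.filter_append, ih]
    by_cases h : m < r.length
    · have ht : r.take (m + 1) = r.take m ++ [r[m]] := by
        rw [List.take_add_one, List.getElem?_eq_getElem h]; rfl
      rw [ht, List.filter_append]
      simp [h]
    · have ht : r.take (m + 1) = r.take m := by
        rw [List.take_of_length_le (by omega), List.take_of_length_le (by omega)]
      simp [ht, List.getElem?_eq_none (show r.length ≤ m by omega)]

theorem a_eq_true_iff (arr : List (List Int)) (row : Int) :
    (notInRow arr row = true
      ↔ (((PySem.List.pyGetD arr row []).take 9).filter (fun x => decide (x ≠ 0))).Nodup) := by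
  unfold notInRow
  rw [notInRowLoop_eq_loopV]
  have hrange : PySem.List.pyRange 0 9 1 = (List.range 9).map (fun k => ((k : Nat) : Int)) := by
    decide
  rw [hrange, List.map_map]
  have hmap : ((fun i => PySem.List.pyGetD (PySem.List.pyGetD arr row []) i 0) ∘ fun k => ((k : Nat) : Int))
      = fun k => (PySem.List.pyGetD arr row []).getD k 0 := by
    funext k; simp [Function.comp, PySem.List.pyGetD_natCast]
  rw [hmap]
  rw [loopV_eq_true_iff _ PySem.Set.empty (by simp [PySem.Set.empty])]
  rw [filter_map_range_getD 9 (PySem.List.pyGetD arr row [])]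
  simp [PySem.Set.empty]

-- B-side: the adjacent scan is the Chain' of (· ≠ ·)
theorem adjAllNe_iff_chain' (l : List Int) :
    adjAllNe l = true ↔ List.IsChain (fun a b => a ≠ b) l := by
  induction l with
  | nil => simp [adjAllNe]
  | cons a t ih =>
    cases t with
    | nil => simp [adjAllNe]
    | cons b rest =>
      rw [List.isChain_cons_cons, ← ih]
      simp [adjAllNe]

-- strengthening adjacent ≠ to adjacent < along an adjacent-≤ chain
theorem isChain_ne_le_lt : ∀ l : List Int,
    List.IsChain (fun a b => a ≠ b) l → List.IsChain (· ≤ ·) l →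
      List.IsChain (fun a b : Int => a < b) l := by
  intro l
  induction l with
  | nil => intro _ _; exact List.IsChain.nil
  | cons a t ih =>
    intro hc hle
    cases t with
    | nil => simp
    | cons b r =>
      rw [List.isChain_cons_cons] at hc hle ⊢
      exact ⟨lt_of_le_of_ne hle.1 hc.1, ih hc.2 hle.2⟩

-- on a ≤-sorted list, adjacent distinctness is the same as global distinctness
theorem chain'_ne_iff_nodup_of_sorted (l : List Int) (hs : l.Pairwise (· ≤ ·)) :
    List.IsChain (fun a b => a ≠ b) l ↔ l.Nodup := by
  constructor
  · intro hc
    have hlt : List.IsChain (fun a b : Int => a < b) l :=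
      isChain_ne_le_lt l hc hs.isChain
    have hp : l.Pairwise (fun a b : Int => a < b) := List.isChain_iff_pairwise.mp hlt
    exact hp.imp ne_of_lt
  · intro hnd
    have hp : l.Pairwise (fun a b : Int => a < b) :=
      (hs.and hnd).imp (fun h => lt_of_le_of_ne h.1 h.2)
    exact (List.isChain_iff_pairwise.mpr hp).imp (fun _ _ h => ne_of_lt h)

theorem alt_eq_true_iff (arr : List (List Int)) (row : Int) :
    (notInRow_alt arr row = true
      ↔ (((PySem.List.pyGetD arr row []).take 9).filter (fun x => decide (x ≠ 0))).Nodup) := by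
  have hslice : PySem.List.slice (PySem.List.pyGetD arr row []) none (some 9)
      = (PySem.List.pyGetD arr row []).take 9 := by
    simp [PySem.List.slice_to]
  show (adjAllNe (PySem.List.sorted _ _ _) = true ↔ _)
  rw [hslice]
  set nz := ((PySem.List.pyGetD arr row []).take 9).filter (fun x => decide (x ≠ 0)) with hnz
  rw [adjAllNe_iff_chain',
      chain'_ne_iff_nodup_of_sorted _ (PySem.List.sorted_pairwise nz (fun x => x)),
      List.Perm.nodup_iff (PySem.List.sorted_perm nz (fun x => x) false)]

-- ===== VERDICT (by name: the statement is the Claim_ definition above) =====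
theorem notInRow_spec : Claim_equal_notInRow := by
  intro arr row _ _
  unfold Spec_notInRow
  rw [Bool.eq_iff_iff, a_eq_true_iff, alt_eq_true_iff]
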